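-- pv_equiv track=rewrite | github.com/sachin-bisht/SQL_QUERY_ANALYSER | query_detector.py | query_check
-- ===== SOURCE A (Python) =====
-- def query_check(content, search, st):
-- 	s_len = len(content)
-- 	r_len = len(search)
--
-- 	if s_len < r_len:
-- 		return -1
-- 	else:
-- 		for i in range(st, s_len):
-- 			# search for r in s until not enough characters are left
-- 			if content[i:i + r_len] == search:
-- 				result = []
-- 				j = i + r_len
-- 				return j
-- 	return -1
-- ===== SOURCE B (Python) =====
-- def query_check(content, search, st):
--     n = len(content)
--     m = len(search)
--     if n < m:
--         return -1
--     if st >= n: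
--         return -1
--     target = sum(map(ord, search))
--     h = sum(map(ord, content[st:st + m]))
--     i = st
--     while i + m <= n:
--         if h == target and content[i:i + m] == search:
--             return i + m
--         if i + m < n:
--             h += ord(content[i + m]) - ord(content[i])
--         i += 1
--     return -1
-- ===== Notes on version B (the rewrite author's own statement) =====
-- stated objective: faster
-- what changed: Replaces A's slice-and-compare at every candidate index with a Rabin-Karp-style single pass: a rolling character-code fingerprint is updated in O(1) per position and the full window is string-compared only when the fingerprint equals the pattern's.
-- outside the precondition, e.g. on query_check('abaaba', 'ab', -1): A returns 2, B returns -1; on query_check('ba', 'a', -4): A returns 2, B raises IndexError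
import Mathlib
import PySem

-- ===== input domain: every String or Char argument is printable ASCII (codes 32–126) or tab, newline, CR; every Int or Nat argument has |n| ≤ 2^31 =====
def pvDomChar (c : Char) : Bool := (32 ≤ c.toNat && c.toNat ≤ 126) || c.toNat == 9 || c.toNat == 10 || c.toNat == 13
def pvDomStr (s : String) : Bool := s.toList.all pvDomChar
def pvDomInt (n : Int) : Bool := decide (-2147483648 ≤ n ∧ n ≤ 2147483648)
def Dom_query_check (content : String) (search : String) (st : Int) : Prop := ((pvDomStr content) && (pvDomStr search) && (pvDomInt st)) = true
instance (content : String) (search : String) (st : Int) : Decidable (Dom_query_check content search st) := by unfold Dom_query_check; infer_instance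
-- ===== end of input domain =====

-- B replaces A's slice-per-candidate scan by a Rabin–Karp-style single pass: a rolling
-- character-code fingerprint is maintained, and the full window is compared only when the
-- fingerprint equals the pattern's (measured faster in a timing run; equal return values on Pre_).

-- ===== PORT A =====
-- the 'for i in range(st, s_len)' loop with its early return
def qcLoopA (content : String) (search : String) (rLen : Int) : List Int → Int
  | [] => -1
  | i :: rest =>
    if PySem.Str.slice content (some i) (some (i + rLen)) == search then i + rLen
    else qcLoopA content search rLen rest

def query_check (content : String) (search : String) (st : Int) : Int :=
  let sLen := PySem.Str.len content
  let rLen := PySem.Str.len search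
  if sLen < rLen then -1
  else qcLoopA content search rLen (PySem.List.pyRange st sLen)

-- ===== PORT B =====
-- sum(map(ord, l))
def qcSumOrd (l : List Char) : Int := (l.map (fun c => (c.toNat : Int))).sum

-- the 'while i + m <= n' loop of Source B; the getD defaults are guarded by 'i + m < n'
-- (the Python indexings content[i+m] / content[i] are in range there, since 0 ≤ st ≤ i)
def qcLoopB (content search : String) (target : Int) (n m : Int) (i : Int) (h : Int) : Int :=
  if _hle : i + m ≤ n then
    if h == target && (PySem.Str.slice content (some i) (some (i + m)) == search) then
      i + m
    else
      let h' := if i + m < n then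
          h + ((((PySem.Str.pyGet? content (i + m)).getD ' ').toNat : Int)
               - (((PySem.Str.pyGet? content i).getD ' ').toNat : Int))
        else h
      qcLoopB content search target n m (i + 1) h'
  else -1
termination_by (n - m + 1 - i).toNat
decreasing_by omega

def query_check_alt (content : String) (search : String) (st : Int) : Int :=
  let n := PySem.Str.len content
  let m := PySem.Str.len search
  if n < m then -1
  else if n ≤ st then -1
  else
    let target := qcSumOrd search.toList
    let h := qcSumOrd (PySem.Str.slice content (some st) (some (st + m))).toList
    qcLoopB content search target n m st h

-- ===== PRECONDITION & SPEC =====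
-- Pre_ excludes negative st (outside the natural domain of a start index): Python's
-- negative-index slicing there wraps A's candidate windows around the end of the string,
-- while B's rolling fingerprint indexes out of range (raising) or misses such matches.
def Pre_query_check (content : String) (search : String) (st : Int) : Prop := 0 ≤ st
instance (content : String) (search : String) (st : Int) : Decidable (Pre_query_check content search st) := by unfold Pre_query_check; infer_instance

def pvWitness_query_check : String × String × Int := ("select * from t", "from", 0)

def Spec_query_check (content : String) (search : String) (st : Int) (out : Int) : Prop := out = query_check_alt content search st
instance (content : String) (search : String) (st : Int) (out : Int) : Decidable (Spec_query_check content search st out) := by unfold Spec_query_check; infer_instance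

-- ===== CLAIM (what is proved, stated in full; the proofs are below) =====
def Claim_equal_query_check : Prop := ∀ (content : String) (search : String) (st : Int), Dom_query_check content search st → Pre_query_check content search st → Spec_query_check content search st (query_check content search st)

-- ===== LEMMAS AND PROOFS =====

-- the fingerprint of the window of length m starting at i
def qcWsum (s : List Char) (m i : Nat) : Int := qcSumOrd ((s.drop i).take m)

-- A's slice test at natural index i, as a statement about lists
lemma qcSlice_toList (content : String) (i m : Nat) :
    (PySem.Str.slice content (some (i : Int)) (some ((i : Int) + (m : Int)))).toList
      = (content.toList.drop i).take m := by
  rw [PySem.Str.toList_slice, PySem.Chars.slice_eq_listSlice, PySem.List.slice_natCast_add]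

lemma qcCond_iff (content search : String) (i m : Nat) :
    (PySem.Str.slice content (some (i : Int)) (some ((i : Int) + (m : Int))) == search) = true
      ↔ (content.toList.drop i).take m = search.toList := by
  rw [beq_iff_eq]
  constructor
  · intro h; rw [← qcSlice_toList, h]
  · intro h
    apply String.toList_inj.mp
    rw [qcSlice_toList, h]

-- if the window matches, its fingerprint equals the pattern's
lemma qcWsum_of_match (content search : String) (i m : Nat)
    (h : (content.toList.drop i).take m = search.toList) :
    qcWsum content.toList m i = qcSumOrd search.toList := by
  unfold qcWsum; rw [h]

-- rolling update of the fingerprint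
lemma qcWsum_roll (s : List Char) (m i : Nat) (hlt : i + m < s.length) :
    qcWsum s m i + (((s[i + m]'hlt).toNat : Int) - ((s[i]'(by omega)).toNat : Int))
      = qcWsum s m (i + 1) := by
  cases m with
  | zero => simp [qcWsum, qcSumOrd]
  | succ k =>
    have hi : i < s.length := by omega
    have hdrop : s.drop i = s[i] :: s.drop (i + 1) := List.drop_eq_getElem_cons hi
    have h1 : qcWsum s (k + 1) i
        = (s[i].toNat : Int) + qcSumOrd ((s.drop (i + 1)).take k) := by
      unfold qcWsum
      rw [hdrop, List.take_succ_cons]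
      simp [qcSumOrd]
    have hk : k < (s.drop (i + 1)).length := by simp; omega
    have h2 : (s.drop (i + 1)).take (k + 1)
        = (s.drop (i + 1)).take k ++ [(s.drop (i + 1))[k]'hk] := by
      rw [List.take_add_one, List.getElem?_eq_getElem hk]; rfl
    have h3 : (s.drop (i + 1))[k]'hk = s[i + 1 + k]'(by omega) := by
      rw [List.getElem_drop]
    have h4 : qcWsum s (k + 1) (i + 1)
        = qcSumOrd ((s.drop (i + 1)).take k) + (s[i + 1 + k]'(by omega)).toNat := by
      unfold qcWsum
      rw [h2, h3]
      simp [qcSumOrd]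
    have h5 : s[i + (k + 1)]'hlt = s[i + 1 + k]'(by omega) := by congr 1; omega
    rw [h1, h4, h5]; ring

-- the loop of A returns -1 when no candidate matches
lemma qcLoopA_none (content search : String) (r : Int) (l : List Int)
    (h : ∀ i ∈ l, ¬ (PySem.Str.slice content (some i) (some (i + r)) == search) = true) :
    qcLoopA content search r l = -1 := by
  induction l with
  | nil => rfl
  | cons a rest ih =>
    rw [qcLoopA, if_neg (h a (List.mem_cons_self))]
    exact ih fun i hi => h i (List.mem_cons_of_mem _ hi)

-- no window starting in [lo, n) can match when the pattern is longer than n - lo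
lemma qcLoopA_none_short (content search : String) (lo n m : Nat)
    (hn : n = content.toList.length) (hm : m = search.toList.length)
    (hshort : n < lo + m) :
    qcLoopA content search (m : Int) (PySem.List.pyRange (lo : Int) (n : Int)) = -1 := by
  apply qcLoopA_none
  intro i hi
  obtain ⟨h1, h2⟩ := PySem.List.mem_pyRange_one.mp hi
  obtain ⟨j, rfl⟩ : ∃ j : Nat, i = (j : Int) := ⟨i.toNat, (Int.toNat_of_nonneg (by omega)).symm⟩
  have hj : j < n := by exact_mod_cast h2
  have hjlo : lo ≤ j := by exact_mod_cast h1
  rw [qcCond_iff content search j m]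
  intro heq
  have hlen := congrArg List.length heq
  simp only [List.length_take, List.length_drop] at hlen
  omega

-- main loop correspondence: with the fingerprint invariant, B's loop equals A's loop
lemma qcLoop_eq (content search : String) (n m : Nat)
    (hn : n = content.toList.length) (hm : m = search.toList.length) :
    ∀ cnt i h, i < n → n - i ≤ cnt → h = qcWsum content.toList m i →
    qcLoopB content search (qcSumOrd search.toList) (n : Int) (m : Int) (i : Int) h
      = qcLoopA content search (m : Int) (PySem.List.pyRange (i : Int) (n : Int)) := by
  intro cnt
  induction cnt with
  | zero => intro i h hi hcnt _; omega
  | succ cnt ih =>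
    intro i h hi hcnt hinv
    have hrangecons : PySem.List.pyRange (i : Int) (n : Int)
        = (i : Int) :: PySem.List.pyRange ((i : Int) + 1) (n : Int) :=
      PySem.List.pyRange_one_cons (by exact_mod_cast hi)
    by_cases hguard : i + m ≤ n
    · rw [qcLoopB, dif_pos (show (i:Int) + (m:Int) ≤ (n:Int) by exact_mod_cast hguard)]
      have hcondB : (h == qcSumOrd search.toList
            && (PySem.Str.slice content (some (i : Int)) (some ((i : Int) + (m : Int))) == search))
          = (PySem.Str.slice content (some (i : Int)) (some ((i : Int) + (m : Int))) == search) := by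
        cases hc : (PySem.Str.slice content (some (i : Int)) (some ((i : Int) + (m : Int))) == search) with
        | false => simp
        | true =>
          have := qcWsum_of_match content search i m ((qcCond_iff content search i m).mp hc)
          simp [hinv, this]
      rw [hcondB]
      by_cases hc : (PySem.Str.slice content (some (i : Int)) (some ((i : Int) + (m : Int))) == search) = true
      · rw [if_pos hc, hrangecons, qcLoopA, if_pos hc]
      · rw [if_neg hc]
        -- the empty pattern always matches, so here m ≥ 1
        have hm1 : 1 ≤ m := by
          rcases Nat.eq_zero_or_pos m with h0 | h1
          · exfalso; apply hc
            rw [qcCond_iff content search i m, h0]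
            have hnil : search.toList = [] := List.length_eq_zero_iff.mp (by omega)
            simp [hnil]
          · exact h1
        rw [hrangecons, qcLoopA, if_neg hc]
        by_cases hlt : i + m < n
        · -- roll the fingerprint and recurse
          rw [if_pos (show (i:Int) + (m:Int) < (n:Int) by exact_mod_cast hlt)]
          have hi1 : i + 1 < n := by omega
          have hget1 : (PySem.Str.pyGet? content ((i : Int) + (m : Int))).getD ' '
              = content.toList[i + m]'(by omega) := by
            have : ((i : Int) + (m : Int)) = ((i + m : Nat) : Int) := by push_cast; ring
            rw [this, PySem.Str.pyGet?_natCast, List.getElem?_eq_getElem (by omega)]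
            rfl
          have hget2 : (PySem.Str.pyGet? content (i : Int)).getD ' '
              = content.toList[i]'(by omega) := by
            rw [PySem.Str.pyGet?_natCast, List.getElem?_eq_getElem (by omega)]
            rfl
          have hinv' : h + ((((PySem.Str.pyGet? content ((i : Int) + (m : Int))).getD ' ').toNat : Int)
                - (((PySem.Str.pyGet? content (i : Int)).getD ' ').toNat : Int))
              = qcWsum content.toList m (i + 1) := by
            rw [hget1, hget2, hinv]
            exact qcWsum_roll content.toList m i (by omega)
          have hcnt1 : n - (i + 1) ≤ cnt := by omega
          have hcast : ((i : Int) + 1) = (((i + 1 : Nat)) : Int) := by push_cast; ring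
          rw [hcast]
          exact ih (i + 1) _ hi1 hcnt1 hinv'
        · -- i + m = n: B stops, A's remaining windows are all too short
          rw [if_neg (show ¬ ((i:Int) + (m:Int) < (n:Int)) by exact_mod_cast hlt)]
          have hin : i + m = n := by omega
          rw [qcLoopB, dif_neg (show ¬ ((i:Int) + 1 + (m:Int) ≤ (n:Int)) by omega)]
          have : ((i : Int) + 1) = (((i + 1 : Nat)) : Int) := by push_cast; ring
          rw [this, qcLoopA_none_short content search (i + 1) n m hn hm (by omega)]
    · -- not even the first window fits: B stops, A finds nothing
      rw [qcLoopB, dif_neg (show ¬ ((i:Int) + (m:Int) ≤ (n:Int)) by exact_mod_cast hguard),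
          qcLoopA_none_short content search i n m hn hm (by omega)]

-- ===== VERDICT (by name: the statement is the Claim_ definition above) =====
theorem query_check_spec : Claim_equal_query_check := by
  intro content search st _ hpre
  unfold Spec_query_check query_check query_check_alt
  simp only []
  have hlenC : PySem.Str.len content = (content.toList.length : Int) := PySem.Str.len_eq content
  have hlenS : PySem.Str.len search = (search.toList.length : Int) := PySem.Str.len_eq search
  by_cases hlt : PySem.Str.len content < PySem.Str.len search
  · rw [if_pos hlt, if_pos hlt]
  · rw [if_neg hlt, if_neg hlt]
    by_cases hst : PySem.Str.len content ≤ st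
    · rw [if_pos hst]
      have hempty : PySem.List.pyRange st (PySem.Str.len content) = [] := by
        rw [PySem.List.pyRange_one]
        have : (PySem.Str.len content - st).toNat = 0 := by omega
        rw [this]; rfl
      rw [hempty]; rfl
    · rw [if_neg hst]
      obtain ⟨k, rfl⟩ : ∃ k : Nat, st = (k : Int) := ⟨st.toNat, (Int.toNat_of_nonneg hpre).symm⟩
      have hk : k < content.toList.length := by omega
      have hinit : qcSumOrd (PySem.Str.slice content (some (k : Int))
            (some ((k : Int) + PySem.Str.len search))).toList
          = qcWsum content.toList search.toList.length k := by
        rw [hlenS, qcSlice_toList]; rfl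
      rw [hinit, hlenC, hlenS,
          qcLoop_eq content search content.toList.length search.toList.length rfl rfl
            (content.toList.length - k + 1) k _ hk (by omega) rfl]
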